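-- pv_equiv track=rewrite | github.com/xpessoles/Informatique_PDF | 2021_2022/S1_Themes/TP03/TP03corr.py | indices_distance_min2
-- ===== SOURCE A (Python) =====
-- L=[4,7,8,7,8,9,9,7,2,0,5]
--
-- def indices_distance_min2(L):  # On cherche min |Ti-tj| pour i<j
--     n=len(L)
--     min=abs(L[1]-L[0])
--     p,q=0,1
--     for i in range(n):
--         for j in range(i+1,n):
--             if abs(L[j]-L[i])<min:
--                 min=abs(L[j]-L[i])
--                 p,q=i,j
--     return p,q
--
-- n=15
-- ===== SOURCE B (Python) =====
-- def indices_distance_min2(L):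
--     s = sorted(L)
--     g = min(abs(y - x) for x, y in zip(s, s[1:]))
--     n = len(L)
--     for i in range(n):
--         for j in range(i + 1, n):
--             if abs(L[j] - L[i]) == g:
--                 return i, j
-- ===== Notes on version B (the rewrite author's own statement) =====
-- stated objective: faster
-- what changed: B sorts the values and reads the minimal absolute gap off adjacent sorted elements instead of A's quadratic running-minimum update over all index pairs, then returns at the first index pair (same lexicographic scan order as A) whose gap equals that precomputed minimum.
import Mathlib
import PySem

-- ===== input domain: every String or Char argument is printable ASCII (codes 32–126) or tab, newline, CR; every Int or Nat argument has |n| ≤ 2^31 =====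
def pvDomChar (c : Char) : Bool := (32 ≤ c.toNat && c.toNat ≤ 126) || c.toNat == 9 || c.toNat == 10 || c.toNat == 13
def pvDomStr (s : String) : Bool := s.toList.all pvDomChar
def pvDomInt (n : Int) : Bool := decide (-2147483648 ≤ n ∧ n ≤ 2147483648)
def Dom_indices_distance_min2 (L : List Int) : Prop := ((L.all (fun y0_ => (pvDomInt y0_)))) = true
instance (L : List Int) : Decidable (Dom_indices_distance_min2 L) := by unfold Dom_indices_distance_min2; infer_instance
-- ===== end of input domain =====

-- B replaces A's quadratic running-minimum scan over all index pairs by: sort the values to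
-- obtain the minimal gap from adjacent elements, then return the first index pair (in the
-- lexicographic scan order) whose gap equals that minimum (early exit).

-- ===== PORT A =====
def indices_distance_min2 (L : List Int) : Int × Int :=
  let n := L.length
  let st :=
    (List.range n).foldl (fun st i =>
      (List.range' (i + 1) (n - (i + 1))).foldl (fun st j =>
        if |L.getD j 0 - L.getD i 0| < st.1 then
          (|L.getD j 0 - L.getD i 0|, ((i : Int), (j : Int)))
        else st) st)
      (|L.getD 1 0 - L.getD 0 0|, ((0 : Int), (1 : Int)))
  st.2

-- ===== PORT B =====
def indices_distance_min2_alt (L : List Int) : Int × Int :=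
  let s := PySem.List.sorted L (fun x => x) false
  -- min(abs(y - x) for x, y in zip(s, s[1:]))  (min of an empty sequence raises: outside Pre_)
  let g := (PySem.List.min? ((s.zip (s.drop 1)).map (fun p => |p.2 - p.1|)) (fun y => y)).getD 0
  let n := L.length
  -- early-return double loop = first pair in lexicographic order whose gap equals g
  match ((List.range n).flatMap (fun i =>
      (List.range' (i + 1) (n - (i + 1))).map (fun j => (i, j)))).find?
      (fun p => |L.getD p.2 0 - L.getD p.1 0| == g) with
  | some p => ((p.1 : Int), (p.2 : Int))
  | none => ((0 : Int), (1 : Int))   -- unreachable under Pre_ (a minimal pair always matches)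

-- ===== PRECONDITION & SPEC =====
-- A evaluates L[1] - L[0] first: on lists of length < 2 it raises IndexError (and B's min()
-- raises ValueError there); Pre_ admits exactly the inputs on which A returns.
def Pre_indices_distance_min2 (L : List Int) : Prop := 2 ≤ L.length
instance (L : List Int) : Decidable (Pre_indices_distance_min2 L) := by
  unfold Pre_indices_distance_min2; infer_instance

def pvWitness_indices_distance_min2 : List Int := [4, 7, 8, 7, 8, 9, 9, 7, 2, 0, 5]

def Spec_indices_distance_min2 (L : List Int) (out : Int × Int) : Prop := out = indices_distance_min2_alt L
instance (L : List Int) (out : Int × Int) : Decidable (Spec_indices_distance_min2 L out) := by unfold Spec_indices_distance_min2; infer_instance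

-- ===== CLAIM (what is proved, stated in full; the proofs are below) =====
def Claim_equal_indices_distance_min2 : Prop := ∀ (L : List Int), Dom_indices_distance_min2 L → Pre_indices_distance_min2 L → Spec_indices_distance_min2 L (indices_distance_min2 L)

-- ===== LEMMAS AND PROOFS =====

-- the lexicographically ordered list of index pairs (i, j) with i < j < n
def pvPairs (n : Nat) : List (Nat × Nat) :=
  (List.range n).flatMap (fun i => (List.range' (i + 1) (n - (i + 1))).map (fun j => (i, j)))

def pvGap (L : List Int) (p : Nat × Nat) : Int := |L.getD p.2 0 - L.getD p.1 0|

-- structural enumeration of all pair gaps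
def pvAllGaps : List Int → List Int
  | [] => []
  | x :: xs => xs.map (fun y => |y - x|) ++ pvAllGaps xs

def pvAdjGaps (s : List Int) : List Int := (s.zip (s.drop 1)).map (fun p => |p.2 - p.1|)

def pvFoldMin {α : Type} (f : α → Int) (ps : List α) (m : Int) : Int :=
  ps.foldl (fun a x => min a (f x)) m

def pvOmin : Option Int → Option Int → Option Int
  | none, b => b
  | a, none => a
  | some x, some y => some (min x y)

theorem pvFoldMin_le {α : Type} (f : α → Int) (ps : List α) (m : Int) :
    pvFoldMin f ps m ≤ m := by
  induction ps generalizing m with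
  | nil => simp [pvFoldMin]
  | cons x t ih =>
    exact le_trans (ih (min m (f x))) (min_le_left _ _)

-- the tracking fold leaves its state unchanged when no element improves it
theorem pvFold_noimp {α : Type} (f : α → Int) (out : α → Int × Int) :
    ∀ (ps : List α) (m : Int) (b : Int × Int), ¬ pvFoldMin f ps m < m →
    ps.foldl (fun st x => if f x < st.1 then (f x, out x) else st) (m, b) = (m, b) := by
  intro ps
  induction ps with
  | nil => intro m b _; rfl
  | cons x t ih =>
    intro m b h
    have hle : pvFoldMin f (x :: t) m ≤ min m (f x) := pvFoldMin_le f t (min m (f x))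
    have hnlt : ¬ f x < m := by
      intro hlt
      exact h (lt_of_le_of_lt (le_trans hle (min_le_right _ _)) hlt)
    have hmin : min m (f x) = m := min_eq_left (not_lt.mp hnlt)
    have hM : pvFoldMin f (x :: t) m = pvFoldMin f t m := by
      simp [pvFoldMin, List.foldl_cons, hmin]
    rw [List.foldl_cons]
    simp only []
    rw [if_neg hnlt]
    exact ih m b (by rwa [hM] at h)

-- when some element improves the initial minimum, the fold returns the first pair attaining it
theorem pvFold_imp {α : Type} (f : α → Int) (out : α → Int × Int) :
    ∀ (ps : List α) (m : Int) (b : Int × Int), pvFoldMin f ps m < m →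
    ∃ x, ps.find? (fun y => f y == pvFoldMin f ps m) = some x ∧
      ps.foldl (fun st x => if f x < st.1 then (f x, out x) else st) (m, b) =
        (pvFoldMin f ps m, out x) := by
  intro ps
  induction ps with
  | nil => intro m b h; simp [pvFoldMin] at h
  | cons x t ih =>
    intro m b h
    by_cases hx : f x < m
    · have hmfx : min m (f x) = f x := min_eq_right hx.le
      have hM : pvFoldMin f (x :: t) m = pvFoldMin f t (f x) := by
        simp [pvFoldMin, List.foldl_cons, hmfx]
      by_cases hMx : pvFoldMin f t (f x) < f x
      · obtain ⟨x₀, hfind, hfold⟩ := ih (f x) (out x) hMx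
        refine ⟨x₀, ?_, ?_⟩
        · rw [List.find?_cons]
          have hne : (f x == pvFoldMin f (x :: t) m) = false := by
            rw [hM]; simp; omega
          rw [hne]
          rw [hM]; exact hfind
        · rw [List.foldl_cons]
          simp only []
          rw [if_pos hx, hM]
          exact hfold
      · have hMeq : pvFoldMin f t (f x) = f x :=
          le_antisymm (pvFoldMin_le f t (f x)) (not_lt.mp hMx)
        refine ⟨x, ?_, ?_⟩
        · rw [List.find?_cons]
          have : (f x == pvFoldMin f (x :: t) m) = true := by
            rw [hM, hMeq]; simp
          rw [this]
        · rw [List.foldl_cons]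
          simp only []
          rw [if_pos hx]
          rw [hM, hMeq]
          exact pvFold_noimp f out t (f x) (out x) hMx
    · have hmfx : min m (f x) = m := min_eq_left (not_lt.mp hx)
      have hM : pvFoldMin f (x :: t) m = pvFoldMin f t m := by
        simp [pvFoldMin, List.foldl_cons, hmfx]
      rw [hM] at h
      obtain ⟨x₀, hfind, hfold⟩ := ih m b h
      refine ⟨x₀, ?_, ?_⟩
      · rw [List.find?_cons]
        have hne : (f x == pvFoldMin f (x :: t) m) = false := by
          rw [hM]; simp; omega
        rw [hne, hM]
        exact hfind
      · rw [List.foldl_cons]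
        simp only []
        rw [if_neg hx, hM]
        exact hfold

theorem pvPairs_succ (n : Nat) :
    pvPairs (n + 1) =
      (List.range' 1 n).map (fun j => (0, j)) ++ (pvPairs n).map (fun p => (p.1 + 1, p.2 + 1)) := by
  unfold pvPairs
  rw [List.range_succ_eq_map, List.flatMap_cons, List.flatMap_map, List.map_flatMap]
  congr 1
  congr 1
  funext i
  have h1 : n + 1 - (i.succ + 1) = n - (i + 1) := by omega
  have h2 : List.range' (i.succ + 1) (n - (i + 1)) =
      (List.range' (i + 1) (n - (i + 1))).map (fun x => 1 + x) := by
    rw [List.map_add_range']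
    congr 1
    omega
  rw [h1, h2, List.map_map, List.map_map]
  apply List.map_congr_left
  intro j _
  simp [Function.comp, Nat.add_comm, Nat.succ_eq_add_one]

theorem pvMap_getD_range (xs : List Int) :
    (List.range xs.length).map (fun j => xs.getD j 0) = xs := by
  induction xs with
  | nil => rfl
  | cons x t ih =>
    rw [List.length_cons, List.range_succ_eq_map, List.map_cons, List.map_map]
    simp only [Function.comp_def, Nat.succ_eq_add_one, List.getD_cons_succ,
      List.getD_cons_zero]
    rw [ih]

theorem pvBridge (L : List Int) : (pvPairs L.length).map (pvGap L) = pvAllGaps L := by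
  induction L with
  | nil => rfl
  | cons x xs ih =>
    rw [List.length_cons, pvPairs_succ, List.map_append, List.map_map, List.map_map]
    unfold pvAllGaps
    congr 1
    · -- head block
      rw [List.range'_eq_map_range, List.map_map]
      conv_rhs => rw [← pvMap_getD_range xs]
      rw [List.map_map]
      apply List.map_congr_left
      intro j _
      simp [pvGap, Function.comp, Nat.add_comm]

theorem pvAllGaps_perm {L L' : List Int} (h : L.Perm L') : (pvAllGaps L).Perm (pvAllGaps L') := by
  induction h with
  | nil => exact List.Perm.refl _
  | cons a h ih => exact ((h.map _).append ih)
  | swap x y l =>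
    simp only [pvAllGaps, List.map_cons, List.cons_append]
    rw [abs_sub_comm y x]
    exact List.Perm.cons _ (List.perm_append_comm_assoc _ _ _)
  | trans h1 h2 ih1 ih2 => exact ih1.trans ih2

theorem pvMin?_perm {l l' : List Int} (h : l.Perm l') : l.min? = l'.min? := by
  cases e : l.min? with
  | none =>
    rw [List.min?_eq_none_iff] at e
    subst e
    rw [h.symm.eq_nil]
    rfl
  | some a =>
    rw [List.min?_eq_some_iff] at e
    symm
    rw [List.min?_eq_some_iff]
    exact ⟨h.mem_iff.mp e.1, fun b hb => e.2 b (h.mem_iff.mpr hb)⟩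

theorem pvMin?_append (l₁ l₂ : List Int) : (l₁ ++ l₂).min? = pvOmin l₁.min? l₂.min? := by
  induction l₁ with
  | nil => rfl
  | cons a t ih =>
    rw [List.cons_append, List.min?_cons, List.min?_cons, ih]
    cases e1 : t.min? <;> cases e2 : l₂.min? <;>
      simp [pvOmin, Option.elim, min_assoc]

theorem pvFoldlMin_pull (t : List Int) : ∀ (a b : Int), min a (t.foldl min b) = t.foldl min (min a b) := by
  induction t with
  | nil => intro a b; rfl
  | cons c t ih =>
    intro a b
    rw [List.foldl_cons, List.foldl_cons, ih, min_assoc]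

theorem pvMin?_cons_foldl (a : Int) (l : List Int) : (a :: l).min? = some (l.foldl min a) := by
  induction l generalizing a with
  | nil => simp [List.min?_cons]
  | cons b t ih =>
    rw [List.min?_cons, ih b]
    simp only [Option.elim]
    rw [List.foldl_cons, pvFoldlMin_pull]

theorem pvAdjGaps_cons (x y : Int) (t : List Int) :
    pvAdjGaps (x :: y :: t) = |y - x| :: pvAdjGaps (y :: t) := by
  simp [pvAdjGaps]

theorem pvFoldl_min_of_le (l : List Int) (m : Int) (h : ∀ a ∈ l, m ≤ a) :
    l.foldl min m = m := by
  induction l generalizing m with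
  | nil => rfl
  | cons a t ih =>
    rw [List.foldl_cons, min_eq_left (h a (by simp))]
    exact ih m (fun b hb => h b (by simp [hb]))

theorem pvSortedMin (s : List Int) (h : s.Pairwise (· ≤ ·)) :
    (pvAllGaps s).min? = (pvAdjGaps s).min? := by
  induction s with
  | nil => rfl
  | cons x xs ih =>
    cases xs with
    | nil => rfl
    | cons y t =>
      have hxy : x ≤ y := (List.pairwise_cons.mp h).1 y (by simp)
      have hall : ∀ z ∈ y :: t, x ≤ z := (List.pairwise_cons.mp h).1
      have hpw : (y :: t).Pairwise (· ≤ ·) := (List.pairwise_cons.mp h).2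
      have hyt : ∀ z ∈ t, y ≤ z := (List.pairwise_cons.mp hpw).1
      rw [pvAdjGaps_cons]
      show ((y :: t).map (fun z => |z - x|) ++ pvAllGaps (y :: t)).min? = _
      rw [pvMin?_append, List.map_cons, pvMin?_cons_foldl]
      have habs : |y - x| = y - x := abs_of_nonneg (by omega)
      have hfold : (t.map (fun z => |z - x|)).foldl min (|y - x|) = |y - x| := by
        apply pvFoldl_min_of_le
        intro a ha
        obtain ⟨z, hz, rfl⟩ := List.mem_map.mp ha
        have h1 : y ≤ z := hyt z hz
        have h2 : x ≤ z := hall z (by simp [hz])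
        rw [habs, abs_of_nonneg (by omega)]
        omega
      rw [hfold, ih hpw]
      have : |y - x| :: pvAdjGaps (y :: t) = [|y - x|] ++ pvAdjGaps (y :: t) := rfl
      rw [this, pvMin?_append]
      rfl

theorem pvPairs_head (n : Nat) (h : 2 ≤ n) : ∃ t, pvPairs n = (0, 1) :: t := by
  obtain ⟨k, rfl⟩ : ∃ k, n = k + 2 := ⟨n - 2, by omega⟩
  exact ⟨(List.range' 2 k).map (fun j => ((0:Nat), j)) ++
      (pvPairs (k + 1)).map (fun p => (p.1 + 1, p.2 + 1)), by
    show pvPairs (k + 1 + 1) = _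
    rw [pvPairs_succ (k + 1), List.range'_succ, List.map_cons, List.cons_append]⟩

theorem pvPyMin (l : List Int) : PySem.List.min? l (fun y => y) = l.min? := by
  cases l with
  | nil => rfl
  | cons x t => rw [PySem.List.min?_id_cons, pvMin?_cons_foldl]

-- ===== VERDICT (by name: the statement is the Claim_ definition above) =====
theorem indices_distance_min2_spec : Claim_equal_indices_distance_min2 := by
  intro L _hdom hpre
  unfold Spec_indices_distance_min2
  obtain ⟨t, hP⟩ := pvPairs_head L.length hpre
  set M := pvFoldMin (pvGap L) t (pvGap L (0, 1)) with hM
  have hA : indices_distance_min2 L =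
      ((pvPairs L.length).foldl
        (fun st p => if pvGap L p < st.1 then (pvGap L p, ((p.1 : Int), (p.2 : Int))) else st)
        (pvGap L (0, 1), ((0 : Int), (1 : Int)))).2 := by
    unfold indices_distance_min2 pvPairs
    rw [List.foldl_flatMap]
    simp only [List.foldl_map]
    rfl
  have hs := PySem.List.sorted_perm L (fun x : Int => x) false
  have hspw : (PySem.List.sorted L (fun x : Int => x) false).Pairwise (· ≤ ·) := by
    simpa using PySem.List.sorted_pairwise L (fun x : Int => x)
  have hgchain : (pvAdjGaps (PySem.List.sorted L (fun x => x) false)).min? = some M := by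
    rw [← pvSortedMin _ hspw, pvMin?_perm (pvAllGaps_perm hs), ← pvBridge, hP,
      List.map_cons, pvMin?_cons_foldl, hM]
    rw [pvFoldMin, List.foldl_map]
  have hB : indices_distance_min2_alt L =
      (match (pvPairs L.length).find? (fun p => pvGap L p == M) with
        | some p => ((p.1 : Int), (p.2 : Int))
        | none => ((0 : Int), (1 : Int))) := by
    show (match (pvPairs L.length).find? (fun p => pvGap L p ==
        (PySem.List.min? (pvAdjGaps (PySem.List.sorted L (fun x => x) false))
          (fun y => y)).getD 0) with
      | some p => ((p.1 : Int), (p.2 : Int))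
      | none => ((0 : Int), (1 : Int))) = _
    rw [pvPyMin, hgchain]
    rfl
  rw [hA, hB, hP, List.foldl_cons, List.find?_cons]
  by_cases hlt : M < pvGap L (0, 1)
  · obtain ⟨x₀, hfind, hfold⟩ :=
      pvFold_imp (pvGap L) (fun p => ((p.1 : Int), (p.2 : Int))) t (pvGap L (0, 1))
        ((0 : Int), (1 : Int)) hlt
    rw [if_neg (lt_irrefl _)]
    rw [hfold]
    have hne : (pvGap L (0, 1) == M) = false := by simp; omega
    rw [hne]
    rw [hfind]
  · have hMeq : M = pvGap L (0, 1) :=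
      le_antisymm (pvFoldMin_le _ _ _) (not_lt.mp hlt)
    rw [if_neg (lt_irrefl _)]
    rw [pvFold_noimp (pvGap L) (fun p => ((p.1 : Int), (p.2 : Int))) t _ _ hlt]
    have heq : (pvGap L (0, 1) == M) = true := by simp [hMeq]
    rw [heq]
    rfl
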